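-- pv_equiv track=rewrite | github.com/albertgarciandres/Jutge | List 3/Sum of numbers in an interval (2)/Sum_of_numbers_in_an_interval_(2).py | sum_interval
-- ===== SOURCE A (Python) =====
-- def sum_interval(a,b,n):
-- 	'''
-- 	>>> sum_interval(5,10,8)
-- 	8
-- 	>>> sum_interval(5,10,3)
-- 	0
-- 	>>> sum_interval(1,100,6)
-- 	510
-- 	>>> sum_interval(10,20,0)
-- 	30
-- 	'''
-- 	total = 0
-- 	while a <= b:
-- 		if str(n) in str(a)[-1]:
-- 			total += a
-- 			a += 1
-- 		else:
-- 			a += 1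
--
-- 	return total
-- ===== SOURCE B (Python) =====
-- def _seg(lo, hi, r):
--     # sum of all k in [lo, hi] with k % 10 == r, by arithmetic series (O(1))
--     first = lo + ((r - lo) % 10)
--     if first > hi:
--         return 0
--     cnt = (hi - first) // 10 + 1
--     return cnt * first + 5 * cnt * (cnt - 1)
--
-- def sum_interval(a, b, n):
--     if not (0 <= n <= 9):
--         return 0
--     # k >= 0 has last digit n iff k % 10 == n; k < 0 iff k % 10 == (10 - n) % 10
--     return _seg(max(a, 0), b, n) + _seg(a, min(b, -1), (10 - n) % 10)
-- ===== Notes on version B (the rewrite author's own statement) =====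
-- stated objective: faster
-- what changed: Replaces A's element-by-element while-loop over [a,b] with an O(1) closed-form arithmetic-series sum over the residue classes mod 10 whose members have last decimal digit n (one class for the nonnegative part, one for the negative part).
import Mathlib
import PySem

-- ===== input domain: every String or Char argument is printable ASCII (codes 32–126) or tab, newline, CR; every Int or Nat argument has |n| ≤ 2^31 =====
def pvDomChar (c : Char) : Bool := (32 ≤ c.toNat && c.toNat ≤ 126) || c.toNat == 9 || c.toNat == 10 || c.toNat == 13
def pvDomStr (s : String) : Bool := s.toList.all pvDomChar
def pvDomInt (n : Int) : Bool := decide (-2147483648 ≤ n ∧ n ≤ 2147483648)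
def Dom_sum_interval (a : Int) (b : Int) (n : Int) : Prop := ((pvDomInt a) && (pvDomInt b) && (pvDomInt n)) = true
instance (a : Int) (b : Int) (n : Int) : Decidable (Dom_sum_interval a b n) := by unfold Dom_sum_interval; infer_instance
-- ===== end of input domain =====

-- B replaces A's O(b-a) scan with an O(1) closed-form arithmetic-series sum over the
-- residue classes (mod 10) whose members have last decimal digit n.

-- ===== PORT A =====
-- A's loop condition: str(n) in str(a)[-1]  (str(a) is never empty, so the none branch is unreachable)
def pyMatchA (a n : Int) : Bool :=
  match PySem.Str.pyGet? (PySem.Int.toStr a) (-1) with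
  | some c => PySem.Str.isIn (PySem.Int.toStr n) (String.ofList [c])
  | none => false

-- the while-loop of A: total accumulates, a counts up to b
def sumLoopA (a b n total : Int) : Int :=
  if a ≤ b then
    if pyMatchA a n then sumLoopA (a + 1) b n (total + a)
    else sumLoopA (a + 1) b n total
  else total
termination_by (b + 1 - a).toNat
decreasing_by all_goals omega

def sum_interval (a : Int) (b : Int) (n : Int) : Int := sumLoopA a b n 0

-- ===== PORT B =====
-- _seg: sum of all k in [lo, hi] with k % 10 == r, as an arithmetic series
def segB (lo hi r : Int) : Int :=
  let first := lo + PySem.Int.mod (r - lo) 10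
  if first > hi then 0
  else
    let cnt := PySem.Int.floordiv (hi - first) 10 + 1
    cnt * first + 5 * cnt * (cnt - 1)

def sum_interval_alt (a : Int) (b : Int) (n : Int) : Int :=
  if 0 ≤ n ∧ n ≤ 9 then
    segB (max a 0) b n + segB a (min b (-1)) (PySem.Int.mod (10 - n) 10)
  else 0

-- ===== PRECONDITION & SPEC =====
def Spec_sum_interval (a : Int) (b : Int) (n : Int) (out : Int) : Prop := out = sum_interval_alt a b n
instance (a : Int) (b : Int) (n : Int) (out : Int) : Decidable (Spec_sum_interval a b n out) := by unfold Spec_sum_interval; infer_instance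

-- ===== CLAIM (what is proved, stated in full; the proofs are below) =====
def Claim_equal_sum_interval : Prop := ∀ (a : Int) (b : Int) (n : Int), Dom_sum_interval a b n → Spec_sum_interval a b n (sum_interval a b n)

-- ===== LEMMAS AND PROOFS =====

-- Nat.toDigitsCore prepends onto its accumulator
lemma toDigitsCore_acc (f : Nat) : ∀ (x : Nat) (acc : List Char),
    ∃ P, Nat.toDigitsCore 10 f x acc = P ++ acc := by
  induction f with
  | zero => intro x acc; exact ⟨[], rfl⟩
  | succ f ih =>
    intro x acc
    simp only [Nat.toDigitsCore]
    by_cases h : x / 10 = 0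
    · exact ⟨[Nat.digitChar (x % 10)], by simp [h]⟩
    · obtain ⟨P, hP⟩ := ih (x / 10) (Nat.digitChar (x % 10) :: acc)
      exact ⟨P ++ [Nat.digitChar (x % 10)], by simp [h, hP]⟩

-- the last character of str(m) is the digit char of m % 10
lemma toDigits_last (m : Nat) :
    ∃ P, Nat.toDigits 10 m = P ++ [Nat.digitChar (m % 10)] := by
  simp only [Nat.toDigits, Nat.toDigitsCore]
  by_cases h : m / 10 = 0
  · exact ⟨[], by simp [h]⟩
  · obtain ⟨P, hP⟩ := toDigitsCore_acc m (m / 10) [Nat.digitChar (m % 10)]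
    exact ⟨P, by simp [h, hP]⟩

lemma toDigitsCore_len (f : Nat) : ∀ (x : Nat) (acc : List Char),
    acc.length + 1 ≤ (Nat.toDigitsCore 10 (f + 1) x acc).length := by
  induction f with
  | zero =>
    intro x acc
    simp only [Nat.toDigitsCore]
    by_cases h : x / 10 = 0 <;> simp [h]
  | succ f ih =>
    intro x acc
    simp only [Nat.toDigitsCore]
    by_cases h : x / 10 = 0
    · simp [h]
    · simp only [if_neg h]
      calc acc.length + 1 ≤ (Nat.digitChar (x % 10) :: acc).length + 1 := by simp
        _ ≤ _ := ih (x / 10) (Nat.digitChar (x % 10) :: acc)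

lemma toDigits_small (m : Nat) (h : m < 10) : Nat.toDigits 10 m = [Nat.digitChar m] := by
  have h0 : m / 10 = 0 := by omega
  have h1 : m % 10 = m := by omega
  simp [Nat.toDigits, Nat.toDigitsCore, h0, h1]

lemma toDigits_big_len (m : Nat) (h : 10 ≤ m) : 2 ≤ (Nat.toDigits 10 m).length := by
  have h0 : ¬ m / 10 = 0 := by omega
  have hm : m - 1 + 1 = m := by omega
  have hlen := toDigitsCore_len (m - 1) (m / 10) [Nat.digitChar (m % 10)]
  rw [hm] at hlen
  simp only [Nat.toDigits, Nat.toDigitsCore, if_neg h0]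
  simp at hlen
  omega

lemma digitChar_inj (x y : Nat) (hx : x < 10) (hy : y < 10)
    (h : Nat.digitChar x = Nat.digitChar y) : x = y := by
  interval_cases x <;> interval_cases y <;> simp_all [Nat.digitChar]

-- str(a) decomposes as prefix ++ [digit of |a| % 10]
lemma toChars_decomp (a : Int) :
    ∃ P, PySem.Int.toChars a = P ++ [Nat.digitChar (a.natAbs % 10)] := by
  simp only [PySem.Int.toChars]
  by_cases h : a < 0
  · obtain ⟨P, hP⟩ := toDigits_last a.natAbs
    exact ⟨'-' :: P, by simp [h, hP]⟩
  · obtain ⟨P, hP⟩ := toDigits_last a.toNat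
    have hab : a.toNat = a.natAbs := by omega
    rw [hab] at hP
    exact ⟨P, by rw [if_neg h, hab]; exact hP⟩

-- str(n) = [c] with c a digit char of d < 10 exactly when n is the one-digit number d
lemma toChars_singleton (n : Int) (d : Nat) (hd : d < 10) :
    PySem.Int.toChars n = [Nat.digitChar d] ↔ 0 ≤ n ∧ n < 10 ∧ n.toNat = d := by
  constructor
  · intro h
    simp only [PySem.Int.toChars] at h
    by_cases hn : n < 0
    · rw [if_pos hn] at h
      obtain ⟨P, hP⟩ := toDigits_last n.natAbs
      simp [hP] at h
    · rw [if_neg hn] at h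
      by_cases hb : n.toNat < 10
      · rw [toDigits_small _ hb] at h
        simp at h
        have := digitChar_inj _ _ hb hd h
        omega
      · have := toDigits_big_len n.toNat (by omega)
        rw [h] at this; simp at this
  · rintro ⟨h0, h9, rfl⟩
    simp only [PySem.Int.toChars, if_neg (by omega : ¬ n < 0)]
    exact toDigits_small _ (by omega)

-- sub <:+: [c] iff sub = [] or sub = [c]
lemma infix_singleton (sub : List Char) (c : Char) :
    sub <:+: [c] ↔ sub = [] ∨ sub = [c] := by
  constructor
  · intro h
    exact List.sublist_singleton.mp h.sublist
  · rintro (rfl | rfl)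
    · exact List.nil_infix
    · exact List.infix_rfl

lemma toChars_ne_nil (n : Int) : PySem.Int.toChars n ≠ [] := by
  obtain ⟨P, hP⟩ := toChars_decomp n
  simp [hP]

-- characterization of A's loop condition
lemma pyMatchA_iff (a n : Int) :
    pyMatchA a n = true ↔ 0 ≤ n ∧ n < 10 ∧ a.natAbs % 10 = n.toNat := by
  obtain ⟨P, hP⟩ := toChars_decomp a
  have hget : PySem.Str.pyGet? (PySem.Int.toStr a) (-1)
      = some (Nat.digitChar (a.natAbs % 10)) := by
    simp only [Int.reduceNeg, PySem.Str.pyGet?_eq, PySem.Int.toList_toStr, hP,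
      PySem.Chars.pyGet?_eq_listPyGet?, PySem.List.pyGet?_neg_one_append_singleton]
  simp only [pyMatchA, hget]
  have hm : a.natAbs % 10 < 10 := by omega
  have : PySem.Str.isIn (PySem.Int.toStr n) (String.ofList [Nat.digitChar (a.natAbs % 10)]) = true
      ↔ PySem.Int.toChars n = [Nat.digitChar (a.natAbs % 10)] := by
    rw [show PySem.Str.isIn (PySem.Int.toStr n) (String.ofList [Nat.digitChar (a.natAbs % 10)])
          = PySem.Chars.isIn (PySem.Int.toChars n) [Nat.digitChar (a.natAbs % 10)] by
        simp only [PySem.Str.isIn_eq, PySem.Int.toList_toStr, String.toList_ofList]]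
    rw [PySem.Chars.isIn_iff_infix, infix_singleton]
    simp [toChars_ne_nil n]
  rw [this, toChars_singleton n _ hm]
  omega

-- segB of an empty interval is 0
lemma segB_empty (lo hi r : Int) (h : hi < lo) : segB lo hi r = 0 := by
  have h0 : 0 ≤ PySem.Int.mod (r - lo) 10 := PySem.Int.mod_nonneg _ (by norm_num)
  simp only [segB]
  rw [if_pos (by omega)]

-- peel the first element off segB
lemma segB_step (lo hi r : Int) (hr0 : 0 ≤ r) (hr9 : r < 10) (hlh : lo ≤ hi) :
    segB lo hi r = (if lo % 10 = r then lo else 0) + segB (lo + 1) hi r := by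
  simp only [segB]
  rw [PySem.Int.mod_eq_emod_of_pos (by norm_num), PySem.Int.mod_eq_emod_of_pos (by norm_num),
      PySem.Int.floordiv_eq_ediv_of_pos (by norm_num), PySem.Int.floordiv_eq_ediv_of_pos (by norm_num)]
  have hm0 : 0 ≤ (r - lo) % 10 := by omega
  have hm9 : (r - lo) % 10 < 10 := by omega
  by_cases hz : (r - lo) % 10 = 0
  · -- lo itself matches the residue class
    have hmatch : lo % 10 = r := by omega
    have hnext : (r - (lo + 1)) % 10 = 9 := by omega
    rw [if_pos hmatch, hz, hnext]
    simp only [add_zero]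
    rw [if_neg (by omega : ¬ lo > hi)]
    by_cases hbig : lo + 1 + 9 > hi
    · rw [if_pos hbig]
      have hc : (hi - lo) / 10 = 0 := by omega
      rw [hc]; ring
    · rw [if_neg hbig]
      have hc : (hi - lo) / 10 + 1 = ((hi - (lo + 1 + 9)) / 10 + 1) + 1 := by omega
      rw [hc]
      generalize ((hi - (lo + 1 + 9)) / 10 + 1) = c
      ring
  · -- lo does not match: first element is unchanged
    have hmatch : ¬ lo % 10 = r := by omega
    have hnext : (r - (lo + 1)) % 10 = (r - lo) % 10 - 1 := by omega
    rw [if_neg hmatch, hnext]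
    have he : lo + 1 + ((r - lo) % 10 - 1) = lo + (r - lo) % 10 := by ring
    rw [he]
    ring_nf

-- B is 0 on an empty interval
lemma alt_empty (a b n : Int) (h : b < a) : sum_interval_alt a b n = 0 := by
  simp only [sum_interval_alt]
  split_ifs with hn
  · rw [segB_empty _ _ _ (by omega), segB_empty _ _ _ (by omega)]; ring
  · rfl

-- B satisfies the same recurrence as A's loop body
lemma alt_step (a b n : Int) (h : a ≤ b) :
    sum_interval_alt a b n = (if pyMatchA a n then a else 0) + sum_interval_alt (a + 1) b n := by
  by_cases hn : 0 ≤ n ∧ n ≤ 9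
  · simp only [sum_interval_alt, if_pos hn]
    have hr' : PySem.Int.mod (10 - n) 10 = (10 - n) % 10 :=
      PySem.Int.mod_eq_emod_of_pos (by norm_num)
    have hmatch : (pyMatchA a n = true) ↔ a.natAbs % 10 = n.toNat := by
      rw [pyMatchA_iff]; omega
    by_cases ha : 0 ≤ a
    · have h1 : max a 0 = a := by omega
      have h2 : max (a + 1) 0 = a + 1 := by omega
      rw [h1, h2, segB_empty a (min b (-1)) _ (by omega),
          segB_empty (a + 1) (min b (-1)) _ (by omega),
          segB_step a b n (by omega) (by omega) h]
      have : (if a % 10 = n then a else 0) = (if pyMatchA a n then a else 0) := by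
        by_cases hc : a % 10 = n
        · rw [if_pos hc, if_pos (hmatch.2 (by omega))]
        · rw [if_neg hc, if_neg (by rw [hmatch]; omega)]
      rw [this]; ring
    · have h1 : max a 0 = 0 := by omega
      have h2 : max (a + 1) 0 = 0 := by omega
      rw [h1, h2, hr', segB_step a (min b (-1)) _ (by omega) (by omega) (by omega)]
      have : (if a % 10 = (10 - n) % 10 then a else 0) = (if pyMatchA a n then a else 0) := by
        by_cases hc : a % 10 = (10 - n) % 10
        · rw [if_pos hc, if_pos (hmatch.2 (by omega))]
        · rw [if_neg hc, if_neg (by rw [hmatch]; omega)]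
      rw [this]; ring
  · simp only [sum_interval_alt, if_neg hn]
    rw [if_neg (by rw [pyMatchA_iff]; omega)]
    ring

lemma loop_eq (b n : Int) : ∀ (k : Nat) (a total : Int), (b + 1 - a).toNat = k →
    sumLoopA a b n total = total + sum_interval_alt a b n := by
  intro k
  induction k with
  | zero =>
    intro a total hk
    unfold sumLoopA
    rw [if_neg (by omega), alt_empty a b n (by omega)]
    ring
  | succ k ih =>
    intro a total hk
    have h : a ≤ b := by omega
    unfold sumLoopA
    rw [if_pos h, alt_step a b n h]
    by_cases hm : pyMatchA a n
    · rw [if_pos hm, if_pos hm, ih (a + 1) (total + a) (by omega)]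
      ring
    · rw [if_neg hm, if_neg hm, ih (a + 1) total (by omega)]
      ring

-- ===== VERDICT (by name: the statement is the Claim_ definition above) =====
theorem sum_interval_spec : Claim_equal_sum_interval := by
  intro a b n _
  show sum_interval a b n = sum_interval_alt a b n
  rw [sum_interval, loop_eq b n (b + 1 - a).toNat a 0 rfl]
  ring
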